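-- pv_equiv track=rewrite | github.com/ETGrif/MonoMatchEnglish | Attempt2/main.py | deAnagram
-- ===== SOURCE A (Python) =====
-- def deAnagram(anagramMap, anagrams):
--     #basis
--     if len(anagrams)==1:
--         return [[x] for x in anagramMap[anagrams[0]]]
--
--     #append a word to each possible list from deAnagram(anagrams[1:])
--     words = anagramMap[anagrams[0]]
--     list = deAnagram(anagramMap, anagrams[1:])
--     newList = []
--     for l in list:
--         for w in words:
--             c = l.copy()
--             c.append(w)
--             newList.append(c)
--     return newList
-- ===== SOURCE B (Python) =====
-- def deAnagram(anagramMap, anagrams):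
--     # Iterative left-to-right product build: each step prepends every word for
--     # the current key to every partial combination built so far.
--     result = [[]]
--     for key in anagrams:
--         result = [[w] + combo for w in anagramMap[key] for combo in result]
--     return result
-- ===== Notes on version B (the rewrite author's own statement) =====
-- stated objective: simpler
-- what changed: Replaced the recursion-on-the-tail with nested append loops by a single iterative left-to-right pass that builds the Cartesian product by prepending each key's words to all partial combinations.
import Mathlib
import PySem

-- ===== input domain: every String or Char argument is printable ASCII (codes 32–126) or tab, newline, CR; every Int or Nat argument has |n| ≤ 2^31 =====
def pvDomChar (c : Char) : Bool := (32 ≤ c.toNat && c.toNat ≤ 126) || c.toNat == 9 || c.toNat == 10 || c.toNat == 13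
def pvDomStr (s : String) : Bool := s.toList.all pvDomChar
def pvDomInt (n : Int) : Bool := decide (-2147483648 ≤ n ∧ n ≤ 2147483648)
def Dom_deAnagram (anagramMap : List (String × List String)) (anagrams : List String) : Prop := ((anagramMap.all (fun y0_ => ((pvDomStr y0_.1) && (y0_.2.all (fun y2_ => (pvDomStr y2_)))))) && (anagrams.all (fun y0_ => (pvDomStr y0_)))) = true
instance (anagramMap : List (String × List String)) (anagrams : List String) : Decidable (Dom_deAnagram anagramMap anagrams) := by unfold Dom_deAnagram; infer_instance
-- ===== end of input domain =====

-- B replaces A's recursion with one iterative left-to-right pass building the product (objective: simpler).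

-- dict lookup (first match in the association list); Python raises KeyError when absent — those inputs are outside Pre_
def pvLookup? (m : List (String × List String)) (k : String) : Option (List String) :=
  match m with
  | [] => none
  | (k', v) :: rest => if k' == k then some v else pvLookup? rest k

def pvGetW (m : List (String × List String)) (k : String) : List String :=
  (pvLookup? m k).getD []

-- ===== PORT A =====
def deAnagram (anagramMap : List (String × List String)) (anagrams : List String) : List (List String) :=
  match anagrams with
  | [] => []          -- Python raises IndexError here (outside Pre_)
  | [a] => (pvGetW anagramMap a).map (fun x => [x])
  | a :: rest =>
    let words := pvGetW anagramMap a
    let lst := deAnagram anagramMap rest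
    lst.foldl (fun newList l => words.foldl (fun nl w => nl ++ [l ++ [w]]) newList) []

-- ===== PORT B =====
def deAnagram_alt (anagramMap : List (String × List String)) (anagrams : List String) : List (List String) :=
  anagrams.foldl
    (fun result key => (pvGetW anagramMap key).flatMap (fun w => result.map (fun combo => w :: combo)))
    [[]]

-- ===== PRECONDITION & SPEC =====
-- Pre_ excludes exactly the inputs where Python A raises: empty anagrams (IndexError) and keys missing from the map (KeyError).
def Pre_deAnagram (anagramMap : List (String × List String)) (anagrams : List String) : Prop :=
  anagrams ≠ [] ∧ ∀ a ∈ anagrams, a ∈ anagramMap.map Prod.fst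
instance (anagramMap : List (String × List String)) (anagrams : List String) : Decidable (Pre_deAnagram anagramMap anagrams) := by unfold Pre_deAnagram; infer_instance

def pvWitness_deAnagram : (List (String × List String)) × List String :=
  ([("ab", ["ab", "ba"]), ("c", ["c"])], ["c", "ab"])

def Spec_deAnagram (anagramMap : List (String × List String)) (anagrams : List String) (out : List (List String)) : Prop := out = deAnagram_alt anagramMap anagrams
instance (anagramMap : List (String × List String)) (anagrams : List String) (out : List (List String)) : Decidable (Spec_deAnagram anagramMap anagrams out) := by unfold Spec_deAnagram; infer_instance

-- ===== CLAIM (what is proved, stated in full; the proofs are below) =====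
def Claim_equal_deAnagram : Prop := ∀ (anagramMap : List (String × List String)) (anagrams : List String), Dom_deAnagram anagramMap anagrams → Pre_deAnagram anagramMap anagrams → Spec_deAnagram anagramMap anagrams (deAnagram anagramMap anagrams)

-- ===== LEMMAS AND PROOFS =====

theorem foldl_inner_outer (words : List String) (lst : List (List String)) :
    ∀ init : List (List String),
      lst.foldl (fun newList l => words.foldl (fun nl w => nl ++ [l ++ [w]]) newList) init
        = init ++ lst.flatMap (fun l => words.map (fun w => l ++ [w])) := by
  induction lst with
  | nil => intro init; simp
  | cons l lst ih =>
    intro init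
    rw [List.foldl_cons, PySem.List.foldl_append_singleton_eq_map, ih]
    simp

-- the right-nested product both programs compute
def pvProd (m : List (String × List String)) : List String → List (List String)
  | [] => [[]]
  | a :: rest => (pvProd m rest).flatMap (fun l => (pvGetW m a).map (fun w => l ++ [w]))

theorem deAnagram_eq_pvProd (m : List (String × List String)) (an : List String) (h : an ≠ []) :
    deAnagram m an = pvProd m an := by
  induction an with
  | nil => exact absurd rfl h
  | cons a rest ih =>
    cases rest with
    | nil =>
      simp [deAnagram, pvProd]
    | cons b rest' =>
      rw [deAnagram]
      simp only [ih (List.cons_ne_nil _ _)]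
      rw [foldl_inner_outer]
      · simp [pvProd]
      · simp

theorem foldl_step_eq_pvProd (m : List (String × List String)) (an : List String) :
    ∀ init : List (List String),
      an.foldl (fun result key => (pvGetW m key).flatMap (fun w => result.map (fun combo => w :: combo))) init
        = (pvProd m an).flatMap (fun l => init.map (fun c => l ++ c)) := by
  induction an with
  | nil => intro init; simp [pvProd]
  | cons a rest ih =>
    intro init
    rw [List.foldl_cons, ih]
    simp only [pvProd, List.flatMap_assoc]
    congr 1
    funext l
    simp [List.map_flatMap, List.flatMap_map, List.map_map, Function.comp_def, List.append_assoc]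

theorem deAnagram_alt_eq_pvProd (m : List (String × List String)) (an : List String) :
    deAnagram_alt m an = pvProd m an := by
  rw [deAnagram_alt, foldl_step_eq_pvProd]
  simp

-- ===== VERDICT (by name: the statement is the Claim_ definition above) =====
theorem deAnagram_spec : Claim_equal_deAnagram := by
  intro m an _ hpre
  unfold Spec_deAnagram
  rw [deAnagram_eq_pvProd m an hpre.1, deAnagram_alt_eq_pvProd]
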